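-- pv_equiv track=rewrite | github.com/pythonstrup/Algorithm-Problem-Solving | Programmers-level2/주식가격.py | solution
-- ===== SOURCE A (Python) =====
-- def solution(prices):
--     n = len(prices)
--     answer = [0] * n
--     stack = []
--
--     for i, price in enumerate(prices):
--         while stack and stack[-1][1] > price:
--             temp = stack.pop()
--             answer[temp[0]] = i - temp[0]
--
--         stack.append((i, price))
--
--     while stack:
--         temp = stack.pop()
--         answer[temp[0]] = n - temp[0] - 1
--
--     return answer
-- ===== SOURCE B (Python) =====
-- def solution(prices):
--     n = len(prices)
--     answer = []
--     for i in range(n):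
--         c = 0
--         for j in range(i + 1, n):
--             c += 1
--             if prices[j] < prices[i]:
--                 break
--         answer.append(c)
--     return answer
-- ===== Notes on version B (the rewrite author's own statement) =====
-- stated objective: simpler
-- what changed: Replaced the index stack plus in-place answer array by a direct double loop: for each i, scan forward counting seconds until the first strictly smaller price.
import Mathlib
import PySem

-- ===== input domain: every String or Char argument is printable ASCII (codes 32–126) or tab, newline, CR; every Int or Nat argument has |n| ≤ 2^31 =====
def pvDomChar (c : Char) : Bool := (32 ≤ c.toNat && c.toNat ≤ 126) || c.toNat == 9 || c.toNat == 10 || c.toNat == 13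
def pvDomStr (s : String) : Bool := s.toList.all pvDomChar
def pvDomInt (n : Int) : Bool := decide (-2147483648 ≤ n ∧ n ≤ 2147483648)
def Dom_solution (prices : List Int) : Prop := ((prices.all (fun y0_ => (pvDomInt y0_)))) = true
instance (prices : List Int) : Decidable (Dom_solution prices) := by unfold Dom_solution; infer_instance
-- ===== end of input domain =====

-- B replaces A's monotonic index stack (and in-place answer array) by the plain
-- quadratic double loop; objective: simpler (B is not faster).

-- ===== PORT A =====
-- inner `while stack and stack[-1][1] > price: pop; answer[temp[0]] = i - temp[0]`
def popDrop (answer : List Int) (stack : List (Nat × Int)) (i : Nat) (price : Int) :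
    List Int × List (Nat × Int) :=
  match stack with
  | [] => (answer, [])
  | (k, p) :: rest =>
      if p > price then popDrop (answer.set k ((i : Int) - (k : Int))) rest i price
      else (answer, (k, p) :: rest)

-- `for i, price in enumerate(prices)` with running index i (stack head = Python stack top)
def mainLoop (answer : List Int) (stack : List (Nat × Int)) (i : Nat) :
    List Int → List Int × List (Nat × Int)
  | [] => (answer, stack)
  | price :: rest =>
      let (a, s) := popDrop answer stack i price
      mainLoop a ((i, price) :: s) (i + 1) rest

-- final `while stack: pop; answer[temp[0]] = n - temp[0] - 1`
def drainStack (n : Nat) (answer : List Int) : List (Nat × Int) → List Int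
  | [] => answer
  | (k, _) :: rest => drainStack n (answer.set k ((n : Int) - (k : Int) - 1)) rest

def solution (prices : List Int) : List Int :=
  let n := prices.length
  let (answer, stack) := mainLoop (List.replicate n 0) [] 0 prices
  drainStack n answer stack

-- ===== PORT B =====
-- inner `for j in range(i+1, n): c += 1; if prices[j] < prices[i]: break`,
-- scanning the suffix after position i
def countAhead (p : Int) : List Int → Int
  | [] => 0
  | q :: rest => if q < p then 1 else 1 + countAhead p rest

def solution_alt (prices : List Int) : List Int :=
  (List.range prices.length).map
    (fun i => countAhead (prices.getD i 0) (prices.drop (i + 1)))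

-- ===== PRECONDITION & SPEC =====
def Spec_solution (prices : List Int) (out : List Int) : Prop := out = solution_alt prices
instance (prices : List Int) (out : List Int) : Decidable (Spec_solution prices out) := by unfold Spec_solution; infer_instance

-- ===== CLAIM (what is proved, stated in full; the proofs are below) =====
def Claim_equal_solution : Prop := ∀ (prices : List Int), Dom_solution prices → Spec_solution prices (solution prices)

-- ===== LEMMAS AND PROOFS =====

-- B's per-index value
def specVal (prices : List Int) (k : Nat) : Int :=
  countAhead (prices.getD k 0) (prices.drop (k + 1))

theorem countAhead_noDrop (p : Int) (l : List Int)
    (h : ∀ m, m < l.length → p ≤ l.getD m 0) : countAhead p l = (l.length : Int) := by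
  induction l with
  | nil => simp [countAhead]
  | cons q rest ih =>
      have h0 := h 0 (by simp)
      simp only [List.getD_cons_zero] at h0
      have : ¬ q < p := not_lt.mpr h0
      simp only [countAhead, if_neg this, List.length_cons]
      rw [ih (fun m hm => by have := h (m+1) (by simpa using Nat.succ_lt_succ hm); simpa using this)]
      push_cast; ring

theorem countAhead_firstDrop (p : Int) (l : List Int) (j : Nat)
    (hj : j < l.length) (hdrop : l.getD j 0 < p)
    (hbefore : ∀ m, m < j → p ≤ l.getD m 0) : countAhead p l = (j : Int) + 1 := by
  induction l generalizing j with
  | nil => simp at hj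
  | cons q rest ih =>
      cases j with
      | zero =>
          simp only [List.getD_cons_zero] at hdrop
          simp [countAhead, hdrop]
      | succ j =>
          have h0 := hbefore 0 (Nat.succ_pos _)
          simp only [List.getD_cons_zero] at h0
          have : ¬ q < p := not_lt.mpr h0
          simp only [countAhead, if_neg this]
          rw [ih j (by simpa using hj) (by simpa using hdrop)
            (fun m hm => by have := hbefore (m+1) (Nat.succ_lt_succ hm); simpa using this)]
          push_cast; ring

theorem getD_drop (l : List Int) (a m : Nat) : (l.drop a).getD m 0 = l.getD (a + m) 0 := by
  simp [List.getD_eq_getElem?_getD, List.getElem?_drop]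

-- invariant of A's main loop after the first i elements have been processed
def StkInv (prices answer : List Int) (stack : List (Nat × Int)) (i : Nat) : Prop :=
  answer.length = prices.length ∧
  List.Pairwise (fun a b => b.1 < a.1 ∧ b.2 ≤ a.2) stack ∧
  (∀ e ∈ stack, e.1 < i ∧ prices.getD e.1 0 = e.2 ∧
     ∀ m, e.1 < m → m < i → e.2 ≤ prices.getD m 0) ∧
  (∀ k, k < i → (∀ e ∈ stack, e.1 ≠ k) → answer.getD k 0 = specVal prices k)

theorem specVal_of_drop (prices : List Int) (k i : Nat) (hk : k < i)
    (hi : i < prices.length)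
    (hlt : prices.getD i 0 < prices.getD k 0)
    (hmono : ∀ m, k < m → m < i → prices.getD k 0 ≤ prices.getD m 0) :
    specVal prices k = (i : Int) - (k : Int) := by
  unfold specVal
  rw [countAhead_firstDrop (prices.getD k 0) (prices.drop (k+1)) (i - k - 1)
    (by simp [List.length_drop]; omega)
    (by rw [getD_drop]; have : k + 1 + (i - k - 1) = i := by omega
        rw [this]; exact hlt)
    (fun m hm => by rw [getD_drop]; exact hmono (k+1+m) (by omega) (by omega))]
  omega

theorem specVal_noDrop (prices : List Int) (k : Nat) (hk : k < prices.length)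
    (hmono : ∀ m, k < m → m < prices.length → prices.getD k 0 ≤ prices.getD m 0) :
    specVal prices k = (prices.length : Int) - (k : Int) - 1 := by
  unfold specVal
  rw [countAhead_noDrop (prices.getD k 0) (prices.drop (k+1))
    (fun m hm => by
      rw [getD_drop]
      exact hmono (k+1+m) (by omega) (by simp [List.length_drop] at hm; omega))]
  simp [List.length_drop]; omega

theorem getD_set_self (l : List Int) (k : Nat) (v : Int) (hk : k < l.length) :
    (l.set k v).getD k 0 = v := by
  simp [List.getD_eq_getElem?_getD, hk]

theorem getD_set_ne (l : List Int) (k m : Nat) (v : Int) (h : k ≠ m) :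
    (l.set k v).getD m 0 = l.getD m 0 := by
  simp [List.getD_eq_getElem?_getD, List.getElem?_set_ne h]

-- effect of popDrop: re-establishes the invariant facts with the new top ≤ price
theorem popDrop_spec (prices : List Int) (i : Nat) (hi : i < prices.length)
    (answer : List Int) (stack : List (Nat × Int))
    (hinv : StkInv prices answer stack i) :
    StkInv prices (popDrop answer stack i (prices.getD i 0)).1
        (popDrop answer stack i (prices.getD i 0)).2 i ∧
    (∀ e ∈ (popDrop answer stack i (prices.getD i 0)).2, e.2 ≤ prices.getD i 0) := by
  induction stack generalizing answer with
  | nil =>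
      simpa [popDrop] using hinv
  | cons e rest ih =>
      obtain ⟨k, p⟩ := e
      obtain ⟨hlen, hpw, hmem, hans⟩ := hinv
      by_cases hgt : p > prices.getD i 0
      · -- pop (k,p)
        simp only [popDrop, if_pos hgt]
        obtain ⟨hk_lt, hk_val, hk_mono⟩ := hmem (k, p) (List.mem_cons_self ..)
        have hspec : specVal prices k = (i : Int) - (k : Int) := by
          apply specVal_of_drop prices k i hk_lt hi
          · rw [hk_val]; exact hgt
          · intro m hm1 hm2; rw [hk_val]; exact hk_mono m hm1 hm2
        apply ih
        refine ⟨by simpa using hlen, (List.pairwise_cons.mp hpw).2,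
          fun e he => hmem e (List.mem_cons_of_mem _ he), ?_⟩
        intro m hm hnot
        by_cases hmk : m = k
        · subst hmk
          rw [getD_set_self _ _ _ (by omega), hspec]
        · rw [getD_set_ne _ _ _ _ (fun h => hmk h.symm)]
          apply hans m hm
          intro e he
          rcases List.mem_cons.mp he with h | h
          · subst h; exact fun h => hmk h.symm
          · exact hnot e h
      · -- stop: top ≤ price, and by pairwise everything below too
        simp only [popDrop, if_neg hgt]
        refine ⟨⟨hlen, hpw, hmem, hans⟩, ?_⟩
        intro e he
        rcases List.mem_cons.mp he with h | h
        · subst h; exact not_lt.mp hgt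
        · exact le_trans ((List.pairwise_cons.mp hpw).1 e h).2 (not_lt.mp hgt)

theorem mainLoop_spec (prices : List Int) (rest answer : List Int)
    (stack : List (Nat × Int)) (i : Nat)
    (hrest : rest = prices.drop i) (hi : i ≤ prices.length)
    (hinv : StkInv prices answer stack i) :
    StkInv prices (mainLoop answer stack i rest).1 (mainLoop answer stack i rest).2
      prices.length := by
  induction rest generalizing answer stack i with
  | nil =>
      have : i = prices.length := by
        have := congrArg List.length hrest
        simp [List.length_drop] at this
        omega
      subst this
      simpa [mainLoop] using hinv
  | cons price tl ih =>
      have hi' : i < prices.length := by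
        have := congrArg List.length hrest
        simp [List.length_drop] at this
        omega
      have hprice : price = prices.getD i 0 := by
        have h := congrArg (fun l => List.getD l 0 0) hrest
        simpa [getD_drop] using h
      subst hprice
      obtain ⟨hinv', htop⟩ := popDrop_spec prices i hi' answer stack hinv
      simp only [mainLoop]
      apply ih _ _ (i + 1)
      · have h := congrArg (List.drop 1) hrest
        simpa [List.drop_drop, Nat.add_comm] using h
      · omega
      · obtain ⟨hlen, hpw, hmem, hans⟩ := hinv'
        refine ⟨hlen, ?_, ?_, ?_⟩
        · exact List.pairwise_cons.mpr
            ⟨fun e he => ⟨(hmem e he).1, htop e he⟩, hpw⟩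
        · intro e he
          rcases List.mem_cons.mp he with h | h
          · subst h; exact ⟨Nat.lt_succ_self i, rfl, fun m h1 h2 => by omega⟩
          · obtain ⟨h1, h2, h3⟩ := hmem e h
            refine ⟨by omega, h2, fun m hm1 hm2 => ?_⟩
            by_cases hmi : m = i
            · subst hmi; exact htop e h
            · exact h3 m hm1 (by omega)
        · intro k hk hnot
          apply hans k
          · have hne := hnot (i, prices.getD i 0) (List.mem_cons_self ..)
            simp at hne
            omega
          · intro e he; exact hnot e (List.mem_cons_of_mem _ he)

theorem drainStack_spec (prices answer : List Int) (stack : List (Nat × Int))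
    (hinv : StkInv prices answer stack prices.length) :
    (drainStack prices.length answer stack).length = prices.length ∧
    ∀ k, k < prices.length →
      (drainStack prices.length answer stack).getD k 0 = specVal prices k := by
  induction stack generalizing answer with
  | nil =>
      obtain ⟨hlen, _, _, hans⟩ := hinv
      exact ⟨by simpa [drainStack] using hlen,
        fun k hk => by simpa [drainStack] using hans k hk (by simp)⟩
  | cons e rest ih =>
      obtain ⟨k, p⟩ := e
      obtain ⟨hlen, hpw, hmem, hans⟩ := hinv
      obtain ⟨hk_lt, hk_val, hk_mono⟩ := hmem (k, p) (List.mem_cons_self ..)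
      have hspec : specVal prices k = (prices.length : Int) - (k : Int) - 1 := by
        apply specVal_noDrop prices k hk_lt
        intro m h1 h2; rw [hk_val]; exact hk_mono m h1 h2
      simp only [drainStack]
      apply ih
      refine ⟨by simpa using hlen, (List.pairwise_cons.mp hpw).2,
        fun e he => hmem e (List.mem_cons_of_mem _ he), ?_⟩
      intro m hm hnot
      by_cases hmk : m = k
      · subst hmk
        rw [getD_set_self _ _ _ (by omega), hspec]
      · rw [getD_set_ne _ _ _ _ (fun h => hmk h.symm)]
        apply hans m hm
        intro e he
        rcases List.mem_cons.mp he with h | h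
        · subst h; exact fun h => hmk h.symm
        · exact hnot e h

-- ===== VERDICT (by name: the statement is the Claim_ definition above) =====
theorem solution_spec : Claim_equal_solution := by
  intro prices _
  unfold Spec_solution
  have hinv0 : StkInv prices (List.replicate prices.length 0) [] 0 :=
    ⟨by simp, by simp, by simp, by intro k hk; omega⟩
  have hmain := mainLoop_spec prices prices (List.replicate prices.length 0) [] 0
    (by simp) (by omega) hinv0
  have hdrain := drainStack_spec prices _ _ hmain
  unfold solution
  apply List.ext_getElem
  · simp [solution_alt, hdrain.1]
  · intro k h1 h2
    have hk : k < prices.length := by simpa [solution_alt] using h2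
    have hL := hdrain.2 k hk
    rw [List.getD_eq_getElem _ _ (by rw [hdrain.1]; exact hk)] at hL
    simp only [solution_alt, List.getElem_map, List.getElem_range]
    exact hL
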